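-- pv_equiv track=rewrite | github.com/slendermantvb/minicmd-repo | MiniCMD/app.py | mode_to_rwx
-- ===== SOURCE A (Python) =====
-- def mode_to_rwx(mode):
--     digits = str(mode).zfill(3)[-3:]
--     out = ""
--     for d in digits:
--         n = int(d)
--         out += "r" if n & 4 else "-"
--         out += "w" if n & 2 else "-"
--         out += "x" if n & 1 else "-"
--     return out
-- ===== SOURCE B (Python) =====
-- # Arithmetic re-implementation: take the last three decimal digits with integer
-- # arithmetic (no string conversion) and map each through a precomputed table.
-- # Table has entries for digits 0-9 because A bit-tests decimal digits.
-- PERM = ["---", "--x", "-w-", "-wx", "r--", "r-x", "rw-", "rwx", "---", "--x"]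
--
-- def mode_to_rwx(mode):
--     m = abs(mode) % 1000
--     return PERM[m // 100] + PERM[m // 10 % 10] + PERM[m % 10]
-- ===== Notes on version B (the rewrite author's own statement) =====
-- stated objective: alternative
-- what changed: B replaces A's string conversion (str/zfill/slicing) and per-bit character building with pure integer arithmetic: it extracts the three decimal digits of abs(mode) % 1000 with //, % and maps each through a precomputed 10-entry permission table.
-- outside the precondition, e.g. on mode_to_rwx(-5): A raises ValueError, B returns '------r-x'
import Mathlib
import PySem

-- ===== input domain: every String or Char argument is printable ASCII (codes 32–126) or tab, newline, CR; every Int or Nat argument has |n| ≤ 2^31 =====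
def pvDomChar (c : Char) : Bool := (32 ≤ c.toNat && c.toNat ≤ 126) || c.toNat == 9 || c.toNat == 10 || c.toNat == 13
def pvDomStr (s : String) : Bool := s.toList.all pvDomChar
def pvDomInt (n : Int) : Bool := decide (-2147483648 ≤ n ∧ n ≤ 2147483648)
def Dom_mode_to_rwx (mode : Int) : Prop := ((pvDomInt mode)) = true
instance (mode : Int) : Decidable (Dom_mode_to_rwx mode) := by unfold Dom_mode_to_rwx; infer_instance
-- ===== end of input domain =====

-- B replaces A's string pipeline (str/zfill/slice, int(d), bit tests per char) by integer
-- arithmetic on abs(mode) % 1000 and a precomputed 10-entry lookup table.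

-- ===== PORT A =====
-- digits = str(mode).zfill(3)[-3:]; then for each char d: n = int(d) (ValueError = none,
-- excluded by Pre_), append the three bit-test characters.  Strings are built on List Char
-- (PySem convention); the loop state is Option (List Char), none exactly where int(d) raises.
def mode_to_rwx (mode : Int) : String :=
  let digits := PySem.List.slice (PySem.Chars.zfill (PySem.Int.toChars mode) 3) (some (-3)) none
  let out? := digits.foldl
    (fun acc? d => acc?.bind fun acc => (PySem.Int.ofChars? [d]).map fun n =>
      ((acc ++ [if PySem.Int.band n 4 ≠ 0 then 'r' else '-'])
            ++ [if PySem.Int.band n 2 ≠ 0 then 'w' else '-'])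
            ++ [if PySem.Int.band n 1 ≠ 0 then 'x' else '-'])
    (some ([] : List Char))
  String.ofList (out?.getD [])

-- ===== PORT B =====
-- PERM = ["---","--x","-w-","-wx","r--","r-x","rw-","rwx","---","--x"]  (strings as List Char)
def pvPERM : List (List Char) :=
  [['-','-','-'], ['-','-','x'], ['-','w','-'], ['-','w','x'],
   ['r','-','-'], ['r','-','x'], ['r','w','-'], ['r','w','x'],
   ['-','-','-'], ['-','-','x']]

-- m = abs(mode) % 1000; return PERM[m // 100] + PERM[m // 10 % 10] + PERM[m % 10]
def mode_to_rwx_alt (mode : Int) : String :=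
  let m := PySem.Int.mod ((mode.natAbs : Int)) 1000
  String.ofList (PySem.List.pyGetD pvPERM (PySem.Int.floordiv m 100) []
    ++ (PySem.List.pyGetD pvPERM (PySem.Int.mod (PySem.Int.floordiv m 10) 10) []
    ++ PySem.List.pyGetD pvPERM (PySem.Int.mod m 10) []))

-- ===== PRECONDITION & SPEC =====
-- Pre_ excludes exactly -99 ≤ mode ≤ -1, where the 3-char slice keeps the '-' sign and
-- A's int('-') raises ValueError.
def Pre_mode_to_rwx (mode : Int) : Prop := 0 ≤ mode ∨ mode ≤ -100
instance (mode : Int) : Decidable (Pre_mode_to_rwx mode) := by unfold Pre_mode_to_rwx; infer_instance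
def pvWitness_mode_to_rwx : Int := (754)

def Spec_mode_to_rwx (mode : Int) (out : String) : Prop := out = mode_to_rwx_alt mode
instance (mode : Int) (out : String) : Decidable (Spec_mode_to_rwx mode out) := by unfold Spec_mode_to_rwx; infer_instance

-- ===== CLAIM (what is proved, stated in full; the proofs are below) =====
def Claim_equal_mode_to_rwx : Prop := ∀ (mode : Int), Dom_mode_to_rwx mode → Pre_mode_to_rwx mode → Spec_mode_to_rwx mode (mode_to_rwx mode)

-- ===== LEMMAS AND PROOFS =====

-- Proof-side decimal-digit list (the recursion Nat.toDigitsCore performs, without fuel).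
def pvDigs (n : Nat) : List Char :=
  if _h : n < 10 then [Nat.digitChar n]
  else pvDigs (n / 10) ++ [Nat.digitChar (n % 10)]
  decreasing_by exact Nat.div_lt_self (by omega) (by omega)

lemma pvDigs_lt (n : Nat) (h : n < 10) : pvDigs n = [Nat.digitChar n] := by
  rw [pvDigs]; simp [h]

lemma pvDigs_ge (n : Nat) (h : 10 ≤ n) : pvDigs n = pvDigs (n / 10) ++ [Nat.digitChar (n % 10)] := by
  rw [pvDigs]; simp [Nat.not_lt.mpr h]

lemma toDigitsCore_eq (f : Nat) : ∀ (n : Nat) (acc : List Char), n < f →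
    Nat.toDigitsCore 10 f n acc = pvDigs n ++ acc := by
  induction f with
  | zero => intro n acc h; omega
  | succ f ih =>
    intro n acc h
    rw [Nat.toDigitsCore]
    by_cases h10 : n < 10
    · have : n / 10 = 0 := Nat.div_eq_of_lt h10
      simp [this, pvDigs_lt n h10, Nat.mod_eq_of_lt h10]
    · have hne : n / 10 ≠ 0 := fun hz => h10 (Nat.lt_of_div_eq_zero (by norm_num) hz)
      simp only [hne]
      rw [ih (n / 10) _ (by omega)]
      rw [pvDigs_ge n (by omega)]
      simp

lemma toDigits_eq_pvDigs (n : Nat) : Nat.toDigits 10 n = pvDigs n := by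
  rw [Nat.toDigits, toDigitsCore_eq (n + 1) n [] (by omega)]; simp

-- the last decimal digit splits off the end
lemma pvDigs_decomp (n : Nat) : ∃ ys, pvDigs n = ys ++ [Nat.digitChar (n % 10)] := by
  by_cases h : n < 10
  · exact ⟨[], by rw [pvDigs_lt n h, Nat.mod_eq_of_lt h]; simp⟩
  · exact ⟨pvDigs (n / 10), pvDigs_ge n (by omega)⟩

-- last three digits of n ≥ 100
lemma pvDigs_decomp3 (n : Nat) (h : 100 ≤ n) :
    ∃ ys, pvDigs n = ys ++ [Nat.digitChar (n / 100 % 10), Nat.digitChar (n / 10 % 10), Nat.digitChar (n % 10)] := by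
  obtain ⟨ys, hy⟩ := pvDigs_decomp (n / 100)
  rw [pvDigs_ge n (by omega), pvDigs_ge (n / 10) (by omega)]
  refine ⟨ys, ?_⟩
  rw [Nat.div_div_eq_div_mul]
  norm_num
  rw [hy]
  simp

-- The slice digits = str(mode).zfill(3)[-3:] as three digit characters of n = |mode|.
-- a decimal digit character is never a sign character
lemma pvDigitChar_ne_sign (k : Nat) (hk : k < 10) :
    ¬(Nat.digitChar k = '+' ∨ Nat.digitChar k = '-') := by
  interval_cases k <;> decide

-- zfill(3) then [-3:] of pvDigs n (optionally behind a '-' sign) yields the three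
-- low decimal digit characters
lemma zfill_slice_pvDigs (n : Nat) :
    PySem.List.slice (PySem.Chars.zfill (pvDigs n) 3) (some (-3)) none
      = [Nat.digitChar (n / 100 % 10), Nat.digitChar (n / 10 % 10), Nat.digitChar (n % 10)] := by
  by_cases hA : n < 10
  · rw [pvDigs_lt n hA]
    rw [PySem.Chars.zfill]
    rw [if_neg (by simp)]
    simp only [pvDigitChar_ne_sign n hA, if_false]
    rw [PySem.List.slice_from_neg_ofNat _ 3 (by norm_num)]
    have h1 : n / 100 % 10 = 0 := by omega
    have h2 : n / 10 % 10 = 0 := by omega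
    have h3 : n % 10 = n := by omega
    rw [h1, h2, h3]
    simp
    decide
  · by_cases hB : n < 100
    · have hcs : pvDigs n = [Nat.digitChar (n / 10), Nat.digitChar (n % 10)] := by
        rw [pvDigs_ge n (by omega), pvDigs_lt (n / 10) (by omega)]; simp
      rw [hcs, PySem.Chars.zfill, if_neg (by simp)]
      simp only [if_neg (pvDigitChar_ne_sign (n / 10) (by omega))]
      rw [PySem.List.slice_from_neg_ofNat _ 3 (by norm_num)]
      have h1 : n / 100 % 10 = 0 := by omega
      have h2 : n / 10 % 10 = n / 10 := by omega
      rw [h1, h2]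
      simp [List.replicate]
      decide
    · obtain ⟨ys, hy⟩ := pvDigs_decomp3 n (by omega)
      rw [hy]; simp only [PySem.Chars.zfill]; rw [if_pos (by simp)]
      rw [PySem.List.slice_from_neg_ofNat _ 3 (by norm_num)]
      have hl : (ys ++ [Nat.digitChar (n / 100 % 10), Nat.digitChar (n / 10 % 10),
          Nat.digitChar (n % 10)]).length - 3 = ys.length := by simp
      rw [hl, List.drop_left]

-- the sliced digit string of str(mode).zfill(3) under Pre_
lemma digits_eq (mode : Int) (hpre : Pre_mode_to_rwx mode) :
    PySem.List.slice (PySem.Chars.zfill (PySem.Int.toChars mode) 3) (some (-3)) none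
      = [Nat.digitChar (mode.natAbs / 100 % 10), Nat.digitChar (mode.natAbs / 10 % 10),
         Nat.digitChar (mode.natAbs % 10)] := by
  rcases hpre with hpos | hneg
  · have h1 : PySem.Int.toChars mode = pvDigs mode.natAbs := by
      unfold PySem.Int.toChars
      rw [if_neg (by omega), toDigits_eq_pvDigs]
      congr 1
      omega
    rw [h1, zfill_slice_pvDigs]
  · have h1 : PySem.Int.toChars mode = '-' :: pvDigs mode.natAbs := by
      unfold PySem.Int.toChars
      rw [if_pos (by omega), toDigits_eq_pvDigs]
    obtain ⟨ys, hy⟩ := pvDigs_decomp3 mode.natAbs (by omega)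
    rw [h1, hy]
    have hco : ('-' :: (ys ++ [Nat.digitChar (mode.natAbs / 100 % 10),
        Nat.digitChar (mode.natAbs / 10 % 10), Nat.digitChar (mode.natAbs % 10)]))
        = ('-' :: ys) ++ [Nat.digitChar (mode.natAbs / 100 % 10),
        Nat.digitChar (mode.natAbs / 10 % 10), Nat.digitChar (mode.natAbs % 10)] := by simp
    rw [hco]; simp only [PySem.Chars.zfill]; rw [if_pos (by simp; omega)]
    rw [PySem.List.slice_from_neg_ofNat _ 3 (by norm_num)]
    have hl : (('-' :: ys) ++ [Nat.digitChar (mode.natAbs / 100 % 10),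
        Nat.digitChar (mode.natAbs / 10 % 10), Nat.digitChar (mode.natAbs % 10)]).length - 3
        = ('-' :: ys).length := by simp
    rw [hl, List.drop_left]

-- one digit character through A's loop body: int(d) succeeds and the three bit tests
-- produce exactly the PERM table entry
lemma pvStep (k : Nat) (hk : k < 10) (acc : List Char) :
    ((PySem.Int.ofChars? [Nat.digitChar k]).map fun n =>
      ((acc ++ [if PySem.Int.band n 4 ≠ 0 then 'r' else '-'])
            ++ [if PySem.Int.band n 2 ≠ 0 then 'w' else '-'])
            ++ [if PySem.Int.band n 1 ≠ 0 then 'x' else '-'])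
      = some (acc ++ pvPERM.getD k []) := by
  interval_cases k <;> simp [pvPERM] <;> decide

-- ===== VERDICT (by name: the statement is the Claim_ definition above) =====
theorem mode_to_rwx_spec : Claim_equal_mode_to_rwx := by
  intro mode _ hpre
  unfold Spec_mode_to_rwx mode_to_rwx mode_to_rwx_alt
  rw [digits_eq mode hpre]
  simp only [List.foldl, Option.bind_some]
  rw [pvStep (mode.natAbs / 100 % 10) (by omega) []]
  simp only [Option.bind_some]
  rw [pvStep (mode.natAbs / 10 % 10) (by omega) _]
  simp only [Option.bind_some]
  rw [pvStep (mode.natAbs % 10) (by omega) _]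
  simp only [Option.getD_some]
  have hm : PySem.Int.mod ((mode.natAbs : Nat) : Int) 1000 = ((mode.natAbs % 1000 : Nat) : Int) :=
    PySem.Int.mod_natCast _ _
  rw [hm]
  have hd1 : PySem.Int.floordiv ((mode.natAbs % 1000 : Nat) : Int) 100
      = ((mode.natAbs % 1000 / 100 : Nat) : Int) := PySem.Int.floordiv_natCast _ _
  have hd2 : PySem.Int.floordiv ((mode.natAbs % 1000 : Nat) : Int) 10
      = ((mode.natAbs % 1000 / 10 : Nat) : Int) := PySem.Int.floordiv_natCast _ _
  have hd3 : PySem.Int.mod ((mode.natAbs % 1000 : Nat) : Int) 10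
      = ((mode.natAbs % 1000 % 10 : Nat) : Int) := PySem.Int.mod_natCast _ _
  rw [hd1, hd2, hd3]
  have hd2' : PySem.Int.mod ((mode.natAbs % 1000 / 10 : Nat) : Int) 10
      = ((mode.natAbs % 1000 / 10 % 10 : Nat) : Int) := PySem.Int.mod_natCast _ _
  rw [hd2']
  simp only [PySem.List.pyGetD_natCast]
  have e1 : mode.natAbs % 1000 / 100 = mode.natAbs / 100 % 10 := by omega
  have e2 : mode.natAbs % 1000 / 10 % 10 = mode.natAbs / 10 % 10 := by omega
  have e3 : mode.natAbs % 1000 % 10 = mode.natAbs % 10 := by omega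
  rw [e1, e2, e3]
  simp
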